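-- pv_equiv track=rewrite | github.com/mharsijamel/odoo-five | addons/l10n_tn_treasury/models/amount_to_text_fr.py | french_number
-- ===== SOURCE A (Python) =====
-- to_19_fr = ('Zéro', 'Un', 'Deux', 'Trois', 'Quatre', 'Cinq', 'Six',
--             'Sept', 'Huit', 'Neuf', 'Dix', 'Onze', 'Douze', 'Treize',
--             'Quatorze', 'Quinze', 'Seize', 'Dix-sept', 'Dix-huit', 'Dix-neuf')
--
-- tens_fr = ('Vingt', 'Trente', 'Quarante', 'Cinquante', 'Soixante', 'Soixante-dix', 'Quatre-vingts', 'Quatre-vingt Dix')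
--
-- denom_fr = ('',
--             'Mille', 'Millions', 'Milliards', 'Billions', 'Quadrillions',
--             'Quintillion', 'Sextillion', 'Septillion', 'Octillion', 'Nonillion',
--             'Décillion', 'Undecillion', 'Duodecillion', 'Tredecillion', 'Quattuordecillion',
--             'Sexdecillion', 'Septendecillion', 'Octodecillion', 'Icosillion', 'Vigintillion')
--
-- def _convert_nn_fr(val):
--     """ convert a value < 100 to French
--     """
--     if val < 20:
--         return to_19_fr[val]
--     for (dcap, dval) in ((k, 20 + (10 * v)) for (v, k) in enumerate(tens_fr)):
--         if dval + 10 > val: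
--             if dval == 70:
--                 return tens_fr[4] + ' ' + to_19_fr[(val % 10) + 10]
--             if dval == 90:
--                 return tens_fr[6] + ' ' + to_19_fr[(val % 10) + 10]
--             if val % 10:
--                 return dcap + '-' + to_19_fr[val % 10]
--             return dcap
--
-- def _convert_nnn_fr(val):
--     """ convert a value < 1000 to french
--
--         special cased because it is the level that kicks
--         off the < 100 special case.  The rest are more general.  This also allows you to
--         get strings in the form of 'forty-five hundred' if called directly.
--     """
--     word = ''
--     (mod, rem) = (val % 100, val // 100)
--     if rem > 0:
--         if rem == 1:
--             word = ' Cent'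
--         else:
--             word = to_19_fr[rem] + ' Cent'
--         if mod > 0:
--             word = word + ' '
--     if mod > 0:
--         word = word + _convert_nn_fr(mod)
--     return word
--
-- def french_number(val):
--     if val < 100:
--         return _convert_nn_fr(val)
--     if val < 1000:
--         return _convert_nnn_fr(val)
--     for (didx, dval) in ((v - 1, 1000 ** v) for v in range(len(denom_fr))):
--         if dval > val:
--             mod = 1000 ** didx
--             l = val // mod
--             r = val - (l * mod)
--             ret = _convert_nnn_fr(l) + ' ' + denom_fr[didx]
--             if r > 0:
--                 ret = ret + ', ' + french_number(r)
--             return ret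
-- ===== SOURCE B (Python) =====
-- to_19_fr = ('Zéro', 'Un', 'Deux', 'Trois', 'Quatre', 'Cinq', 'Six',
--             'Sept', 'Huit', 'Neuf', 'Dix', 'Onze', 'Douze', 'Treize',
--             'Quatorze', 'Quinze', 'Seize', 'Dix-sept', 'Dix-huit', 'Dix-neuf')
--
-- tens_fr = ('Vingt', 'Trente', 'Quarante', 'Cinquante', 'Soixante', 'Soixante-dix', 'Quatre-vingts', 'Quatre-vingt Dix')
--
-- denom_fr = ('',
--             'Mille', 'Millions', 'Milliards', 'Billions', 'Quadrillions',
--             'Quintillion', 'Sextillion', 'Septillion', 'Octillion', 'Nonillion',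
--             'Décillion', 'Undecillion', 'Duodecillion', 'Tredecillion', 'Quattuordecillion',
--             'Sexdecillion', 'Septendecillion', 'Octodecillion', 'Icosillion', 'Vigintillion')
--
--
-- def _nn(n):
--     # 0..99: arithmetic table lookup, no scan over tens_fr
--     if n < 20:
--         return to_19_fr[n]
--     t, u = divmod(n, 10)
--     if t == 7 or t == 9:
--         return tens_fr[t - 3] + ' ' + to_19_fr[u + 10]
--     if u:
--         return tens_fr[t - 2] + '-' + to_19_fr[u]
--     return tens_fr[t - 2]
--
--
-- def _nnn(n):
--     # 0..999
--     h, r = divmod(n, 100)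
--     head = '' if h == 0 else (' Cent' if h == 1 else to_19_fr[h] + ' Cent')
--     if h and r:
--         return head + ' ' + _nn(r)
--     return head + (_nn(r) if r else '')
--
--
-- def french_number(val):
--     # iterative: peel 3-digit groups LSB-first once, render nonzero groups, join MSB-first
--     if val < 100:
--         return _nn(val)
--     parts = []
--     i, v = 0, val
--     while v > 0:
--         v, g = divmod(v, 1000)
--         if g:
--             parts.append(_nnn(g) + (' ' + denom_fr[i] if i else ''))
--         i += 1
--     return ', '.join(reversed(parts))
-- ===== Notes on version B (the rewrite author's own statement) =====
-- stated objective: alternative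
-- what changed: A renders by recursive descent (linear scan of the powers of 1000 to find the leading denomination, emit the top group, recurse on the remainder, with the sub-100 case done by scanning tens_fr); B has no recursion and no scans: it peels 3-digit groups LSB-first with one divmod loop, renders each nonzero group with arithmetic table lookups (tens picked by n//10, not by scanning tens_fr), and joins the rendered groups MSB-first with ', '.
import Mathlib
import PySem

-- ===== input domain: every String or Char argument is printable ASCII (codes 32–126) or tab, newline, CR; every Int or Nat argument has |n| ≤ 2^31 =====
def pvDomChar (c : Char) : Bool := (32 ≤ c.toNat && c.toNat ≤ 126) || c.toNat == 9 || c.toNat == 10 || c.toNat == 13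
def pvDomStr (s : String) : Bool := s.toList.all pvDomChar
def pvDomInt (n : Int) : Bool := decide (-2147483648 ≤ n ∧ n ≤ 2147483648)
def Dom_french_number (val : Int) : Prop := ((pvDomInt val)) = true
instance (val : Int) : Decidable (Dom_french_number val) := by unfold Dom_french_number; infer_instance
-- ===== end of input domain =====

-- B replaces A's recursive descent (scan the powers of 1000 for the leading denomination, recurse on
-- the remainder, scan tens_fr for the tens word) by an iteration with no scans: one LSB-first divmod
-- loop peeling 3-digit groups, arithmetic table lookups for the tens, and a ', '-join of the rendered
-- groups MSB-first.  Objective: alternative.  The word tables are module constants shared by both.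

-- ===== PORT A =====
def to_19_fr : List String :=
  ["Zéro", "Un", "Deux", "Trois", "Quatre", "Cinq", "Six",
   "Sept", "Huit", "Neuf", "Dix", "Onze", "Douze", "Treize",
   "Quatorze", "Quinze", "Seize", "Dix-sept", "Dix-huit", "Dix-neuf"]

def tens_fr : List String :=
  ["Vingt", "Trente", "Quarante", "Cinquante", "Soixante", "Soixante-dix", "Quatre-vingts", "Quatre-vingt Dix"]

def denom_fr : List String :=
  ["", "Mille", "Millions", "Milliards", "Billions", "Quadrillions",
   "Quintillion", "Sextillion", "Septillion", "Octillion", "Nonillion",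
   "Décillion", "Undecillion", "Duodecillion", "Tredecillion", "Quattuordecillion",
   "Sexdecillion", "Septendecillion", "Octodecillion", "Icosillion", "Vigintillion"]

-- to_19_fr[i] (Python raises IndexError where pyGet? is none; those inputs are outside Pre_)
def get19 (i : Int) : String := (PySem.List.pyGet? to_19_fr i).getD ""

-- the 'for (dcap, dval) in ((k, 20 + 10*v) for (v, k) in enumerate(tens_fr))' loop of _convert_nn_fr
def nnLoop (val : Int) : List (Int × String) → String
  | [] => ""   -- Python falls off the loop returning None; unreachable for val < 100
  | (v, dcap) :: rest =>
    let dval : Int := 20 + 10 * v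
    if dval + 10 > val then
      if dval = 70 then ((PySem.List.pyGet? tens_fr 4).getD "") ++ " " ++ get19 (PySem.Int.mod val 10 + 10)
      else if dval = 90 then ((PySem.List.pyGet? tens_fr 6).getD "") ++ " " ++ get19 (PySem.Int.mod val 10 + 10)
      else if PySem.Int.mod val 10 ≠ 0 then dcap ++ "-" ++ get19 (PySem.Int.mod val 10)
      else dcap
    else nnLoop val rest

def convert_nn_fr (val : Int) : String :=
  if val < 20 then get19 val
  else nnLoop val (PySem.List.enumerate tens_fr)

def convert_nnn_fr (val : Int) : String :=
  let md := PySem.Int.mod val 100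
  let rem := PySem.Int.floordiv val 100
  let word :=
    if rem > 0 then
      (if rem = 1 then " Cent" else get19 rem ++ " Cent") ++ (if md > 0 then " " else "")
    else ""
  if md > 0 then word ++ convert_nn_fr md else word

-- french_number's recursion, fuel-guarded (depth ≤ one recursive call per 3-digit group,
-- so fuel 21 = len(denom_fr) is never exhausted on the admitted domain)
mutual
def frRec : Nat → Int → String
  | 0, _ => ""       -- fuel guard only, never reached on the admitted domain
  | f + 1, val =>
    if val < 100 then convert_nn_fr val
    else if val < 1000 then convert_nnn_fr val
    else frLoop f val (List.range 21)   -- for v in range(len(denom_fr))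
termination_by f _ => (f, 0)

def frLoop : Nat → Int → List Nat → String
  | _, _, [] => ""   -- Python falls off the loop returning None (only for val ≥ 1000^20, outside Dom)
  | f, val, v :: rest =>
    if (1000 : Int) ^ v > val then
      -- didx = v - 1; v = 0 never takes this branch here (val ≥ 1000 > 1 = 1000^0)
      let didx := v - 1
      let m : Int := 1000 ^ didx
      let l := PySem.Int.floordiv val m
      let r := val - l * m
      let ret := convert_nnn_fr l ++ " " ++ (PySem.List.pyGet? denom_fr (didx : Int)).getD ""
      if r > 0 then ret ++ ", " ++ frRec f r else ret
    else frLoop f val rest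
termination_by f _ l => (f, l.length + 1)
end

def french_number (val : Int) : String := frRec 21 val

-- ===== PORT B =====
-- _nn: 0..99 by arithmetic lookup (tens word picked by n // 10, no scan)
def nnAlt (n : Int) : String :=
  if n < 20 then (PySem.List.pyGet? to_19_fr n).getD ""
  else
    let t := PySem.Int.floordiv n 10
    let u := PySem.Int.mod n 10
    if t = 7 ∨ t = 9 then
      (PySem.List.pyGet? tens_fr (t - 3)).getD "" ++ " " ++ (PySem.List.pyGet? to_19_fr (u + 10)).getD ""
    else if u ≠ 0 then
      (PySem.List.pyGet? tens_fr (t - 2)).getD "" ++ "-" ++ (PySem.List.pyGet? to_19_fr u).getD ""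
    else (PySem.List.pyGet? tens_fr (t - 2)).getD ""

-- _nnn: 0..999
def nnnAlt (n : Int) : String :=
  let h := PySem.Int.floordiv n 100
  let r := PySem.Int.mod n 100
  let head := if h = 0 then "" else if h = 1 then " Cent" else (PySem.List.pyGet? to_19_fr h).getD "" ++ " Cent"
  if h ≠ 0 ∧ r ≠ 0 then head ++ " " ++ nnAlt r
  else head ++ (if r ≠ 0 then nnAlt r else "")

-- the 'while v > 0: v, g = divmod(v, 1000); if g: parts.append(...); i += 1' loop
def altLoop (v : Int) (i : Int) (parts : List String) : List String :=
  if _h : v > 0 then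
    let v' := PySem.Int.floordiv v 1000
    let g := PySem.Int.mod v 1000
    let parts' :=
      if g ≠ 0 then parts ++ [nnnAlt g ++ (if i ≠ 0 then " " ++ (PySem.List.pyGet? denom_fr i).getD "" else "")]
      else parts
    altLoop v' (i + 1) parts'
  else parts
termination_by v.toNat
decreasing_by
  have h1 : PySem.Int.floordiv v 1000 = v / 1000 := PySem.Int.floordiv_eq_ediv_of_pos (by omega)
  rw [h1]; omega

def french_number_alt (val : Int) : String :=
  if val < 100 then nnAlt val
  else PySem.Str.join ", " (altLoop val 0 []).reverse

-- ===== PRECONDITION & SPEC =====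
-- Pre_ excludes exactly the inputs on which Python A raises IndexError
-- (val ≤ -21 reaches to_19_fr[val] with an index below -len; B raises identically there).
def Pre_french_number (val : Int) : Prop := -20 ≤ val
instance (val : Int) : Decidable (Pre_french_number val) := by unfold Pre_french_number; infer_instance

def pvWitness_french_number : Int := 123456

def Spec_french_number (val : Int) (out : String) : Prop := out = french_number_alt val
instance (val : Int) (out : String) : Decidable (Spec_french_number val out) := by unfold Spec_french_number; infer_instance

-- ===== CLAIM (what is proved, stated in full; the proofs are below) =====
def Claim_equal_french_number : Prop := ∀ (val : Int), Dom_french_number val → Pre_french_number val → Spec_french_number val (french_number val)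

-- ===== LEMMAS AND PROOFS =====

-- the two sub-100 renderers agree on -20 ≤ n < 100
lemma nn_eq (n : Int) (h0 : -20 ≤ n) (h1 : n < 100) : convert_nn_fr n = nnAlt n := by
  by_cases h : n < 20
  · simp [convert_nn_fr, nnAlt, h, get19]
  · interval_cases n <;> decide

-- the two sub-1000 renderers agree on 0 < n < 1000
lemma nnn_eq (n : Int) (h0 : 0 < n) (h1 : n < 1000) : convert_nnn_fr n = nnnAlt n := by
  unfold convert_nnn_fr nnnAlt
  rw [PySem.Int.mod_eq_emod_of_pos (by omega), PySem.Int.floordiv_eq_ediv_of_pos (by omega)]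
  have hnn : ∀ r : Int, 0 < r → r < 100 → convert_nn_fr r = nnAlt r := fun r hr hr' => nn_eq r (by omega) hr'
  by_cases hh : n / 100 = 0
  · have hr : n % 100 = n := by omega
    simp [hh, hr, h0.ne', hnn n h0 (by omega)]
    intro hc; omega
  · have hhp : 0 < n / 100 := by omega
    by_cases hr : n % 100 = 0
    · simp [hh, hr, get19, hhp]
    · have hrp : 0 < n % 100 := by omega
      simp [hh, hr, get19, hrp, hhp, hnn (n % 100) hrp (by omega), String.append_assoc]

-- the piece B appends for group g at index i
def pieceB (g i : Int) : String :=
  nnnAlt g ++ (if i ≠ 0 then " " ++ (PySem.List.pyGet? denom_fr i).getD "" else "")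

lemma altLoop_zero (v i : Int) (parts : List String) (h : ¬ v > 0) : altLoop v i parts = parts := by
  rw [altLoop]; simp [h]

lemma altLoop_step (v i : Int) (parts : List String) (h : 0 < v) :
    altLoop v i parts =
      altLoop (v / 1000) (i + 1)
        (if v % 1000 ≠ 0 then parts ++ [pieceB (v % 1000) i] else parts) := by
  rw [altLoop]
  rw [PySem.Int.mod_eq_emod_of_pos (by omega), PySem.Int.floordiv_eq_ediv_of_pos (by omega)]
  simp [h, pieceB]

lemma altLoop_acc (n : Nat) : ∀ (v i : Int) (parts : List String), v.toNat ≤ n →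
    altLoop v i parts = parts ++ altLoop v i [] := by
  induction n with
  | zero =>
    intro v i parts h
    have hv : ¬ v > 0 := by omega
    rw [altLoop_zero _ _ _ hv, altLoop_zero _ _ _ hv, List.append_nil]
  | succ n ih =>
    intro v i parts h
    by_cases hv : 0 < v
    · rw [altLoop_step _ _ _ hv, altLoop_step _ _ _ hv]
      have hle : (v / 1000).toNat ≤ n := by omega
      by_cases hg : v % 1000 ≠ 0
      · rw [if_pos hg, if_pos hg, List.nil_append, ih _ _ _ hle,
           ih (v / 1000) (i + 1) [pieceB (v % 1000) i] hle, List.append_assoc]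
      · rw [if_neg hg, if_neg hg]
        exact ih _ _ _ hle
    · rw [altLoop_zero _ _ _ hv, altLoop_zero _ _ _ hv, List.append_nil]

lemma altLoop_unfold (v i : Int) (h : 0 < v) :
    altLoop v i [] = (if v % 1000 ≠ 0 then [pieceB (v % 1000) i] else []) ++ altLoop (v / 1000) (i + 1) [] := by
  rw [altLoop_step v i [] h]
  by_cases hg : v % 1000 ≠ 0
  · rw [if_pos hg, if_pos hg, List.nil_append]
    exact altLoop_acc (v / 1000).toNat (v / 1000) (i + 1) _ le_rfl
  · rw [if_neg hg, if_neg hg, List.nil_append]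

-- one group
lemma lowG1 (v i : Int) (h0 : 0 < v) (h1 : v < 1000) : altLoop v i [] = [pieceB v i] := by
  rw [altLoop_unfold v i h0, show v % 1000 = v from by omega, show v / 1000 = 0 from by omega,
      altLoop_zero _ _ _ (by omega), if_pos h0.ne', List.append_nil]

lemma lowG0or1 (r i : Int) (h0 : 0 ≤ r) (h1 : r < 1000) :
    altLoop r i [] = if r ≠ 0 then [pieceB r i] else [] := by
  by_cases hr : r = 0
  · subst hr; rw [altLoop_zero _ _ _ (by omega), if_neg (by omega)]
  · rw [lowG1 r i (by omega) h1, if_pos hr]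

-- two groups: the lower part is B's rendering of the remainder
lemma lowG2 (v i : Int) (h0 : 1000 ≤ v) (h1 : v < 1000000) :
    altLoop v i [] = altLoop (v % 1000) i [] ++ [pieceB (v / 1000) (i + 1)] := by
  rw [altLoop_unfold v i (by omega), lowG1 (v / 1000) (i + 1) (by omega) (by omega),
      lowG0or1 (v % 1000) i (by omega) (by omega)]

lemma lowG3 (v i : Int) (h0 : 1000000 ≤ v) (h1 : v < 1000000000) :
    altLoop v i [] = altLoop (v % 1000000) i [] ++ [pieceB (v / 1000000) (i + 2)] := by
  rw [altLoop_unfold v i (by omega), lowG2 (v / 1000) (i + 1) (by omega) (by omega)]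
  have e1 : v / 1000 / 1000 = v / 1000000 := by omega
  have e2 : v / 1000 % 1000 = v % 1000000 / 1000 := by omega
  rw [e1, e2, show i + 1 + 1 = i + 2 from by ring]
  by_cases hz : v % 1000000 = 0
  · have z0 : v % 1000 = 0 := by omega
    have hA : ∀ j : Int, altLoop 0 j ([] : List String) = [] := fun j => altLoop_zero 0 j [] (by omega)
    simp [hz, z0, hA]
  · rw [altLoop_unfold (v % 1000000) i (by omega),
        show v % 1000000 % 1000 = v % 1000 from by omega, List.append_assoc]

lemma lowG4 (v i : Int) (h0 : 1000000000 ≤ v) (h1 : v < 1000000000000) :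
    altLoop v i [] = altLoop (v % 1000000000) i [] ++ [pieceB (v / 1000000000) (i + 3)] := by
  rw [altLoop_unfold v i (by omega), lowG3 (v / 1000) (i + 1) (by omega) (by omega)]
  have e1 : v / 1000 / 1000000 = v / 1000000000 := by omega
  have e2 : v / 1000 % 1000000 = v % 1000000000 / 1000 := by omega
  rw [e1, e2, show i + 1 + 2 = i + 3 from by ring]
  by_cases hz : v % 1000000000 = 0
  · have z0 : v % 1000 = 0 := by omega
    have hA : ∀ j : Int, altLoop 0 j ([] : List String) = [] := fun j => altLoop_zero 0 j [] (by omega)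
    simp [hz, z0, hA]
  · rw [altLoop_unfold (v % 1000000000) i (by omega),
        show v % 1000000000 % 1000 = v % 1000 from by omega, List.append_assoc]

-- join-cons when the tail is nonempty
lemma join_cons (x : String) (ps : List String) (h : ps ≠ []) :
    PySem.Str.join ", " (x :: ps) = x ++ ", " ++ PySem.Str.join ", " ps := by
  cases ps with
  | nil => simp at h
  | cons y t =>
    apply String.ext
    simp [PySem.Str.join, PySem.Chars.join_cons_cons]

lemma join_singleton (x : String) : PySem.Str.join ", " [x] = x := by
  simp [PySem.Str.join, PySem.Chars.join_singleton]

-- unfolding lemmas for A's denomination scan (copied verbatim from the A port's loop)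
lemma frLoop_skip (f : Nat) (val : Int) (v : Nat) (rest : List Nat) (h : ¬ (1000 : Int) ^ v > val) :
    frLoop f val (v :: rest) = frLoop f val rest := by
  rw [frLoop]; simp [h]

lemma frLoop_hit (f : Nat) (val : Int) (v : Nat) (rest : List Nat) (h : (1000 : Int) ^ v > val) :
    frLoop f val (v :: rest) =
      (let didx := v - 1
       let m : Int := 1000 ^ didx
       let l := PySem.Int.floordiv val m
       let r := val - l * m
       let ret := convert_nnn_fr l ++ " " ++ (PySem.List.pyGet? denom_fr (didx : Int)).getD ""
       if r > 0 then ret ++ ", " ++ frRec f r else ret) := by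
  rw [frLoop]; simp [h]

lemma range21 : List.range 21 = [0,1,2,3,4,5,6,7,8,9,10,11,12,13,14,15,16,17,18,19,20] := by rfl

lemma frLoop1 (f : Nat) (val : Int) (h0 : 1000 ≤ val) (h1 : val < 1000000) :
    frLoop f val (List.range 21) =
      if val % 1000 > 0 then
        convert_nnn_fr (val / 1000) ++ " " ++ "Mille" ++ ", " ++ frRec f (val % 1000)
      else convert_nnn_fr (val / 1000) ++ " " ++ "Mille" := by
  rw [range21, frLoop_skip _ _ _ _ (by norm_num; omega), frLoop_skip _ _ _ _ (by norm_num; omega),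
      frLoop_hit _ _ _ _ (by norm_num; omega)]
  norm_num
  have e3 : (PySem.List.pyGet? denom_fr 1).getD "" = "Mille" := by decide
  rw [e3]
  by_cases hm : 0 < val % 1000
  · rw [if_pos (by omega), if_pos hm, show val - val / 1000 * 1000 = val % 1000 from by omega]
  · rw [if_neg (by omega), if_neg hm]

lemma frLoop2 (f : Nat) (val : Int) (h0 : 1000000 ≤ val) (h1 : val < 1000000000) :
    frLoop f val (List.range 21) =
      if val % 1000000 > 0 then
        convert_nnn_fr (val / 1000000) ++ " " ++ "Millions" ++ ", " ++ frRec f (val % 1000000)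
      else convert_nnn_fr (val / 1000000) ++ " " ++ "Millions" := by
  rw [range21, frLoop_skip _ _ _ _ (by norm_num; omega), frLoop_skip _ _ _ _ (by norm_num; omega),
      frLoop_skip _ _ _ _ (by norm_num; omega), frLoop_hit _ _ _ _ (by norm_num; omega)]
  norm_num
  have e3 : (PySem.List.pyGet? denom_fr 2).getD "" = "Millions" := by decide
  rw [e3]
  by_cases hm : 0 < val % 1000000
  · rw [if_pos (by omega), if_pos hm, show val - val / 1000000 * 1000000 = val % 1000000 from by omega]
  · rw [if_neg (by omega), if_neg hm]

lemma frLoop3 (f : Nat) (val : Int) (h0 : 1000000000 ≤ val) (h1 : val < 1000000000000) :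
    frLoop f val (List.range 21) =
      if val % 1000000000 > 0 then
        convert_nnn_fr (val / 1000000000) ++ " " ++ "Milliards" ++ ", " ++ frRec f (val % 1000000000)
      else convert_nnn_fr (val / 1000000000) ++ " " ++ "Milliards" := by
  rw [range21, frLoop_skip _ _ _ _ (by norm_num; omega), frLoop_skip _ _ _ _ (by norm_num; omega),
      frLoop_skip _ _ _ _ (by norm_num; omega), frLoop_skip _ _ _ _ (by norm_num; omega),
      frLoop_hit _ _ _ _ (by norm_num; omega)]
  norm_num
  have e3 : (PySem.List.pyGet? denom_fr 3).getD "" = "Milliards" := by decide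
  rw [e3]
  by_cases hm : 0 < val % 1000000000
  · rw [if_pos (by omega), if_pos hm, show val - val / 1000000000 * 1000000000 = val % 1000000000 from by omega]
  · rw [if_neg (by omega), if_neg hm]

-- the top piece at index i ≥ 1 equals A's 'convert_nnn_fr l ++ " " ++ denom' shape
lemma pieceB_top (g i : Int) (h0 : 0 < g) (h1 : g < 1000) (hi : i ≠ 0) (w : String)
    (hw : (PySem.List.pyGet? denom_fr i).getD "" = w) :
    pieceB g i = convert_nnn_fr g ++ " " ++ w := by
  rw [pieceB, nnn_eq g h0 h1, hw]
  simp [hi, String.append_assoc]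

-- B's value as a join, for val ≥ 100
lemma alt_join (v : Int) (h : ¬ v < 100) :
    french_number_alt v = PySem.Str.join ", " (altLoop v 0 []).reverse := by
  simp [french_number_alt, h]

-- the core equivalence, by strong induction on the value
lemma core : ∀ n : Nat, ∀ (d : Nat) (val : Int) (f : Nat), val.toNat = n → 0 < val →
    val < 1000 ^ (d + 1) → d < f → d ≤ 3 →
    frRec f val = PySem.Str.join ", " (altLoop val 0 []).reverse ∧ altLoop val 0 [] ≠ [] := by
  intro n
  induction n using Nat.strong_induction_on with
  | _ n ih =>
    intro d val f hn hpos hlt hdf hd3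
    obtain ⟨f, rfl⟩ : ∃ f', f = f' + 1 := ⟨f - 1, by omega⟩
    have hfr : frRec (f + 1) val =
        (if val < 100 then convert_nn_fr val
         else if val < 1000 then convert_nnn_fr val
         else frLoop f val (List.range 21)) := by rw [frRec]
    have hub : val < 1000000000000 := by
      have h4 : (1000:Int) ^ (d + 1) ≤ 1000 ^ 4 := pow_le_pow_right₀ (by norm_num) (by omega)
      norm_num at h4
      omega
    by_cases hv3 : val < 1000
    · rw [lowG1 val 0 hpos hv3]
      refine ⟨?_, by simp⟩
      rw [hfr]
      have hp0 : pieceB val 0 = nnnAlt val := by simp [pieceB]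
      by_cases h100 : val < 100
      · rw [if_pos h100]
        simp only [List.reverse_singleton]
        rw [join_singleton, hp0, ← nnn_eq val hpos hv3]
        -- convert_nnn_fr = convert_nn_fr below 100
        unfold convert_nnn_fr
        rw [PySem.Int.mod_eq_emod_of_pos (by omega), PySem.Int.floordiv_eq_ediv_of_pos (by omega)]
        have h2 : val / 100 = 0 := by omega
        have h3 : val % 100 = val := by omega
        rw [h2, h3]
        simp [hpos]
      · rw [if_neg h100, if_pos hv3]
        simp only [List.reverse_singleton]
        rw [join_singleton, hp0, nnn_eq val hpos hv3]
    · have hd1 : 1 ≤ d := by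
        by_contra h
        have h2 : (1000:Int) ^ (d + 1) ≤ 1000 ^ 1 := pow_le_pow_right₀ (by norm_num) (by omega)
        norm_num at h2
        omega
      by_cases hc1 : val < 1000000
      · -- two groups
        rw [lowG2 val 0 (by omega) hc1, show (0:Int) + 1 = 1 from by ring]
        refine ⟨?_, by simp⟩
        rw [hfr, if_neg (by omega), if_neg (by omega), frLoop1 f val (by omega) hc1]
        rw [List.reverse_append, List.reverse_singleton, List.singleton_append,
            pieceB_top (val / 1000) 1 (by omega) (by omega) (by norm_num) "Mille" (by decide)]
        by_cases hm : 0 < val % 1000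
        · obtain ⟨ihr, ihp⟩ := ih (val % 1000).toNat (by omega) 0 (val % 1000) f
            rfl hm (by norm_num; omega) (by omega) (by omega)
          rw [if_pos hm, join_cons _ _ (by simpa using ihp), ihr]
        · have hz : val % 1000 = 0 := by omega
          rw [if_neg hm, hz, altLoop_zero _ _ _ (by omega)]
          simp only [List.reverse_nil]
          rw [join_singleton]
      · have hd2 : 2 ≤ d := by
          by_contra h
          have h2 : (1000:Int) ^ (d + 1) ≤ 1000 ^ 2 := pow_le_pow_right₀ (by norm_num) (by omega)
          norm_num at h2
          omega
        by_cases hc2 : val < 1000000000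
        · -- three groups
          rw [lowG3 val 0 (by omega) hc2, show (0:Int) + 2 = 2 from by ring]
          refine ⟨?_, by simp⟩
          rw [hfr, if_neg (by omega), if_neg (by omega), frLoop2 f val (by omega) hc2]
          rw [List.reverse_append, List.reverse_singleton, List.singleton_append,
              pieceB_top (val / 1000000) 2 (by omega) (by omega) (by norm_num) "Millions" (by decide)]
          by_cases hm : 0 < val % 1000000
          · obtain ⟨ihr, ihp⟩ := ih (val % 1000000).toNat (by omega) 1 (val % 1000000) f
              rfl hm (by norm_num; omega) (by omega) (by omega)
            rw [if_pos hm, join_cons _ _ (by simpa using ihp), ihr]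
          · have hz : val % 1000000 = 0 := by omega
            rw [if_neg hm, hz, altLoop_zero _ _ _ (by omega)]
            simp only [List.reverse_nil]
            rw [join_singleton]
        · have hd3' : 3 ≤ d := by
            by_contra h
            have h2 : (1000:Int) ^ (d + 1) ≤ 1000 ^ 3 := pow_le_pow_right₀ (by norm_num) (by omega)
            norm_num at h2
            omega
          -- four groups
          rw [lowG4 val 0 (by omega) hub, show (0:Int) + 3 = 3 from by ring]
          refine ⟨?_, by simp⟩
          rw [hfr, if_neg (by omega), if_neg (by omega), frLoop3 f val (by omega) hub]
          rw [List.reverse_append, List.reverse_singleton, List.singleton_append,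
              pieceB_top (val / 1000000000) 3 (by omega) (by omega) (by norm_num) "Milliards" (by decide)]
          by_cases hm : 0 < val % 1000000000
          · obtain ⟨ihr, ihp⟩ := ih (val % 1000000000).toNat (by omega) 2 (val % 1000000000) f
              rfl hm (by norm_num; omega) (by omega) (by omega)
            rw [if_pos hm, join_cons _ _ (by simpa using ihp), ihr]
          · have hz : val % 1000000000 = 0 := by omega
            rw [if_neg hm, hz, altLoop_zero _ _ _ (by omega)]
            simp only [List.reverse_nil]
            rw [join_singleton]

-- ===== VERDICT (by name: the statement is the Claim_ definition above) =====
theorem french_number_spec : Claim_equal_french_number := by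
  intro val hdom hpre
  unfold Spec_french_number
  have hub : val ≤ 2147483648 := by
    simp [Dom_french_number, pvDomInt] at hdom
    omega
  by_cases h100 : val < 100
  · unfold french_number french_number_alt
    rw [show frRec 21 val =
          (if val < 100 then convert_nn_fr val
           else if val < 1000 then convert_nnn_fr val
           else frLoop 20 val (List.range 21)) from by rw [frRec]]
    rw [if_pos h100, if_pos h100, nn_eq val hpre h100]
  · have hpos : (0:Int) < val := by omega
    have hcore := core val.toNat 3 val 21 rfl hpos (by norm_num; omega) (by norm_num) (by norm_num)
    unfold french_number
    rw [hcore.1, alt_join val h100]
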